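-- pv_equiv track=rewrite | github.com/Rahulnisanth/Complete-Python-Hub | CompetitiveCodings/AutoDesk.py | sortByDiff
-- ===== SOURCE A (Python) =====
-- from heapq import heappush, heappop
--
-- def sortByDiff(text):
--     minHeap, vowels = [], "aeiou"
--     for word in text.split():
--         VCount = sum([1 for ch in word if ch in vowels])
--         CCount = len(word) - VCount
--         diff = abs(VCount - CCount)
--         heappush(minHeap, (diff, word))
--
--     result = []
--     while minHeap:
--         diff, word = heappop(minHeap)
--         result.append(word)
--     return result
-- ===== SOURCE B (Python) =====
-- def _vcKey(w):
--     v = sum(ch in "aeiou" for ch in w)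
--     return (abs(2 * v - len(w)), w)
--
-- def sortByDiff(text):
--     return sorted(text.split(), key=_vcKey)
-- ===== Notes on version B (the rewrite author's own statement) =====
-- stated objective: idiomatic
-- what changed: Replaces the explicit heap build (heappush per word) and the pop-until-empty drain loop with a single comparison sort keyed by (|vowels-consonants|, word), which reproduces the heap's (diff, word) pop order.
import Mathlib
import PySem

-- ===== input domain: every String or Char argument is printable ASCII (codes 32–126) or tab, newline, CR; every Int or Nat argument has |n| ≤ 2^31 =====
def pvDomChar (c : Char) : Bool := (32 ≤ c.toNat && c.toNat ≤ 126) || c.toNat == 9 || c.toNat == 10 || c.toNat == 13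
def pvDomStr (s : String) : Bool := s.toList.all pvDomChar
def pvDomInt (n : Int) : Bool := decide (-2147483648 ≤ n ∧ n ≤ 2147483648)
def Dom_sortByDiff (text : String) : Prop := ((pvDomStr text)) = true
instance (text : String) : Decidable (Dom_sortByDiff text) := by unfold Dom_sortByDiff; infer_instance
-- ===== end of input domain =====

-- B replaces A's heap build + pop-drain loop by one comparison sort keyed by (|vowels-consonants|, word); same return value.

-- ===== PORT A =====
-- Python tuple comparison (d1, w1) < (d2, w2) used by heapq on A's (diff, word) pairs.
def pairLt (x y : Int × String) : Bool :=
  decide (x.1 < y.1) || (!decide (y.1 < x.1) && decide (x.2 < y.2))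

-- The sift loops and the drain loop are written with an explicit fuel counter (structural
-- recursion); the wrappers pass enough fuel for the loop to run exactly as CPython's does.
-- CPython heapq._siftdown(heap, startpos, pos) with newitem = heap[pos] passed explicitly
def siftdownAGo : Nat → List (Int × String) → Nat → Nat → (Int × String) → List (Int × String)
  | 0, heap, _, pos, newitem => heap.set pos newitem
  | fuel + 1, heap, startpos, pos, newitem =>
    if startpos < pos then
      let parentpos := (pos - 1) / 2
      let parent := heap[parentpos]!
      if pairLt newitem parent then
        siftdownAGo fuel (heap.set pos parent) startpos parentpos newitem
      else
        heap.set pos newitem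
    else
      heap.set pos newitem

def siftdownA (heap : List (Int × String)) (startpos pos : Nat) (newitem : Int × String) :
    List (Int × String) :=
  siftdownAGo (pos + 1) heap startpos pos newitem

-- CPython heapq._siftup(heap, pos) with newitem = heap[pos] passed explicitly
def siftupAGo : Nat → List (Int × String) → Nat → Nat → (Int × String) → List (Int × String)
  | 0, heap, startpos, pos, newitem => siftdownA (heap.set pos newitem) startpos pos newitem
  | fuel + 1, heap, startpos, pos, newitem =>
    let endpos := heap.length
    let childpos := 2 * pos + 1
    if childpos < endpos then
      let rightpos := childpos + 1
      let childpos' := if rightpos < endpos && !pairLt heap[childpos]! heap[rightpos]! then rightpos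
                       else childpos
      siftupAGo fuel (heap.set pos heap[childpos']!) startpos childpos' newitem
    else
      siftdownA (heap.set pos newitem) startpos pos newitem

def siftupA (heap : List (Int × String)) (startpos pos : Nat) (newitem : Int × String) :
    List (Int × String) :=
  siftupAGo (heap.length + 1) heap startpos pos newitem

-- heapq.heappush
def heappushA (heap : List (Int × String)) (item : Int × String) : List (Int × String) :=
  siftdownA (heap ++ [item]) 0 heap.length item

-- heapq.heappop (A only calls it on a nonempty heap)
def heappopA (heap : List (Int × String)) : (Int × String) × List (Int × String) :=
  -- lastelt = heap.pop(); rest = the shrunk list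
  if heap.dropLast.length ≠ 0 then
    (heap.dropLast[0]!, siftupA (heap.dropLast.set 0 heap.getLast!) 0 0 heap.getLast!)
  else
    (heap.getLast!, heap.dropLast)

-- the while-loop draining the heap into result
def drainAGo : Nat → List (Int × String) → List String → List String
  | 0, _, result => result
  | fuel + 1, heap, result =>
    if heap.length ≠ 0 then
      let p := heappopA heap
      drainAGo fuel p.2 (result ++ [p.1.2])
    else
      result

def drainA (heap : List (Int × String)) (result : List String) : List String :=
  drainAGo heap.length heap result

-- VCount = sum([1 for ch in word if ch in vowels])
def vowelCountA (word : String) : Int :=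
  (((word.toList.filter (fun ch => "aeiou".toList.contains ch)).map (fun _ => (1 : Int)))).sum

-- the (diff, word) tuple pushed for each word
def apair (word : String) : Int × String :=
  let V := vowelCountA word
  let C := (PySem.Str.len word : Int) - V
  (|V - C|, word)

def sortByDiff (text : String) : List String :=
  let minHeap := (PySem.Str.split₀ text).foldl (fun h word => heappushA h (apair word)) []
  drainA minHeap []

-- ===== PORT B =====
-- v = sum(ch in "aeiou" for ch in w)
def vowelCountB (w : String) : Int :=
  (w.toList.countP (fun ch => "aeiou".toList.contains ch) : Int)

-- key(w) = (abs(2*v - len(w)), w);  sorted(..., key=key) = sorted2 with tuple key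
def bkey (w : String) : Int := |2 * vowelCountB w - (PySem.Str.len w : Int)|

def sortByDiff_alt (text : String) : List String :=
  PySem.List.sorted2 (PySem.Str.split₀ text) (fun w => bkey w) (fun w => w) false

-- ===== PRECONDITION & SPEC =====
def Spec_sortByDiff (text : String) (out : List String) : Prop := out = sortByDiff_alt text
instance (text : String) (out : List String) : Decidable (Spec_sortByDiff text out) := by unfold Spec_sortByDiff; infer_instance

-- ===== CLAIM (what is proved, stated in full; the proofs are below) =====
def Claim_equal_sortByDiff : Prop := ∀ (text : String), Dom_sortByDiff text → Spec_sortByDiff text (sortByDiff text)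

-- ===== LEMMAS AND PROOFS =====

lemma length_siftdownAGo (fuel : Nat) :
    ∀ (heap : List (Int × String)) (startpos pos : Nat) (newitem : Int × String),
    (siftdownAGo fuel heap startpos pos newitem).length = heap.length := by
  induction fuel with
  | zero => intro heap sp pos item; simp [siftdownAGo]
  | succ n ih =>
    intro heap sp pos item
    rw [siftdownAGo]
    simp only
    split
    · split
      · rw [ih]; simp
      · simp
    · simp

lemma length_siftdownA (heap : List (Int × String)) (startpos pos : Nat) (newitem : Int × String) :
    (siftdownA heap startpos pos newitem).length = heap.length := by
  rw [siftdownA, length_siftdownAGo]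

lemma length_siftupAGo (fuel : Nat) :
    ∀ (heap : List (Int × String)) (startpos pos : Nat) (newitem : Int × String),
    (siftupAGo fuel heap startpos pos newitem).length = heap.length := by
  induction fuel with
  | zero => intro heap sp pos item; simp [siftupAGo, length_siftdownA]
  | succ n ih =>
    intro heap sp pos item
    rw [siftupAGo]
    split
    · rw [ih]; simp
    · simp [length_siftdownA]

lemma length_siftupA (heap : List (Int × String)) (startpos pos : Nat) (newitem : Int × String) :
    (siftupA heap startpos pos newitem).length = heap.length := by
  rw [siftupA, length_siftupAGo]

lemma length_heappopA (heap : List (Int × String)) (h : heap.length ≠ 0) :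
    (heappopA heap).2.length = heap.length - 1 := by
  unfold heappopA
  split <;> simp_all [length_siftupA]

-- `le x y` = "x ≤ y" in the lexicographic (diff, word) order Python's tuple `<` induces
def hle (x y : Int × String) : Prop := pairLt y x = false

lemma pairLt_irrefl (x : Int × String) : pairLt x x = false := by
  simp [pairLt]

lemma pairLt_eq_true_iff (x y : Int × String) :
    pairLt x y = true ↔ (x.1 < y.1 ∨ (x.1 ≤ y.1 ∧ x.2 < y.2)) := by
  simp only [pairLt, Bool.or_eq_true, Bool.and_eq_true, Bool.not_eq_true',
    decide_eq_true_eq, decide_eq_false_iff_not, not_lt]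

lemma pairLt_eq_false_iff (x y : Int × String) :
    pairLt x y = false ↔ (y.1 ≤ x.1 ∧ (x.1 ≤ y.1 → ¬ x.2 < y.2)) := by
  rw [← Bool.not_eq_true, pairLt_eq_true_iff]
  constructor
  · intro h
    refine ⟨by by_contra hc; exact h (Or.inl (by omega)), fun h1 h2 => h (Or.inr ⟨h1, h2⟩)⟩
  · rintro ⟨h1, h2⟩ (h3 | ⟨h3, h4⟩)
    · omega
    · exact h2 h3 h4

lemma hle_iff (x y : Int × String) :
    hle x y ↔ (x.1 ≤ y.1 ∧ (y.1 ≤ x.1 → ¬ y.2 < x.2)) := pairLt_eq_false_iff y x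

lemma pairLt_asymm {x y : Int × String} (h : pairLt x y = true) : pairLt y x = false := by
  rw [pairLt_eq_true_iff] at h
  rw [pairLt_eq_false_iff]
  rcases h with h | ⟨h1, h2⟩
  · exact ⟨by omega, fun h1 => absurd h1 (by omega)⟩
  · exact ⟨h1, fun _ h3 => lt_asymm h2 h3⟩

lemma hle_trans {x y z : Int × String} (h1 : hle x y) (h2 : hle y z) : hle x z := by
  rw [hle_iff] at *
  refine ⟨by omega, fun hzx h => ?_⟩
  have hx2 : x.2 ≤ y.2 := not_lt.mp (h1.2 (by omega))
  have hy2 : y.2 ≤ z.2 := not_lt.mp (h2.2 (by omega))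
  exact absurd h (not_lt.mpr (le_trans hx2 hy2))

lemma hle_antisymm {x y : Int × String} (h1 : hle x y) (h2 : hle y x) : x = y := by
  rw [hle_iff] at *
  exact Prod.ext (by omega) (le_antisymm (not_lt.mp (h1.2 (by omega))) (not_lt.mp (h2.2 (by omega))))

lemma hle_of_lt {x y : Int × String} (h : pairLt x y = true) : hle x y := pairLt_asymm h

lemma hle_refl (x : Int × String) : hle x x := pairLt_irrefl x

lemma hle_of_not_lt {x y : Int × String} (h : pairLt y x = false) : hle x y := h

-- heap (parent ≤ child) invariant, phrased through the parent index (j-1)/2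
def ParentInv (h : List (Int × String)) : Prop :=
  ∀ j, (hj : j < h.length) → 0 < j → hle (h[(j - 1) / 2]'(by omega)) h[j]

lemma parentInv_min {h : List (Int × String)} (hp : ParentInv h) :
    ∀ j, (hj : j < h.length) → hle (h[0]'(by omega)) h[j] := by
  intro j
  induction j using Nat.strong_induction_on with
  | _ j ih =>
    intro hj
    rcases Nat.eq_zero_or_pos j with h0 | h0
    · subst h0; exact hle_refl _
    · exact hle_trans (ih ((j - 1) / 2) (by omega) (by omega)) (hp j hj h0)

-- count of List.set
lemma count_set (l : List (Int × String)) (i : Nat) (x v : Int × String) (hi : i < l.length) :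
    (l.set i x).count v + (if l[i] = v then 1 else 0) = l.count v + (if x = v then 1 else 0) := by
  induction l generalizing i with
  | nil => simp at hi
  | cons a t ih =>
    cases i with
    | zero =>
      simp only [List.set_cons_zero, List.count_cons, List.getElem_cons_zero]
      split_ifs <;> simp_all [beq_iff_eq]
    | succ n =>
      simp only [List.set_cons_succ, List.count_cons, List.getElem_cons_succ]
      have := ih n (by simpa using hi)
      split_ifs at this ⊢ <;> omega

-- the two sift procedures permute {heap with `item` written at the hole `pos`}
lemma perm_set_swap (l : List (Int × String)) (i j : Nat) (x y : Int × String)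
    (hi : i < l.length) (hj : j < l.length) (hij : i ≠ j) :
    ((l.set i x).set j y).Perm ((l.set i y).set j x) := by
  rw [List.perm_iff_count]
  intro v
  have h1 := count_set (l.set i x) j y v (by simpa using hj)
  have h2 := count_set l i x v hi
  have h3 := count_set (l.set i y) j x v (by simpa using hj)
  have h4 := count_set l i y v hi
  have e1 : (l.set i x)[j]'(by simpa using hj) = l[j] := by
    rw [List.getElem_set]; simp [hij]
  have e2 : (l.set i y)[j]'(by simpa using hj) = l[j] := by
    rw [List.getElem_set]; simp [hij]
  rw [e1] at h1; rw [e2] at h3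
  split_ifs at * <;> omega

-- ===== siftdown (bubble-up) correctness =====
lemma siftdownAGo_congr (fuel : Nat) :
    ∀ (fuel' : Nat) (heap : List (Int × String)) (sp pos : Nat) (item : Int × String),
    pos < fuel → pos < fuel' →
    siftdownAGo fuel heap sp pos item = siftdownAGo fuel' heap sp pos item := by
  induction fuel with
  | zero => intro fuel' heap sp pos item h _; omega
  | succ n ih =>
    intro fuel' heap sp pos item h h'
    cases fuel' with
    | zero => omega
    | succ n' =>
      rw [siftdownAGo, siftdownAGo]
      simp only
      split
      · next hsp =>
        split
        · exact ih n' _ sp _ item (by omega) (by omega)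
        · rfl
      · rfl

lemma siftdownA_eq (heap : List (Int × String)) (sp pos : Nat) (item : Int × String) :
    siftdownA heap sp pos item =
      if sp < pos then
        (if pairLt item heap[(pos - 1) / 2]! then
          siftdownA (heap.set pos heap[(pos - 1) / 2]!) sp ((pos - 1) / 2) item
        else heap.set pos item)
      else heap.set pos item := by
  rw [siftdownA, siftdownAGo]
  by_cases h : sp < pos
  · simp only [if_pos h]
    split
    · rw [siftdownA]
      exact siftdownAGo_congr pos _ _ sp _ item (by omega) (by omega)
    · rfl
  · simp only [if_neg h]

lemma siftdownA_spec (pos : Nat) :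
    ∀ (heap : List (Int × String)) (item : Int × String)
    (hpos : pos < heap.length)
    (HA : ∀ j, (hj : j < heap.length) → 0 < j → j ≠ pos → (j - 1) / 2 ≠ pos →
          hle (heap[(j - 1) / 2]'(by omega)) heap[j])
    (HB : ∀ c, (hc : c < heap.length) → (c = 2 * pos + 1 ∨ c = 2 * pos + 2) → 0 < pos →
          hle (heap[(pos - 1) / 2]'(by omega)) heap[c])
    (HC : ∀ c, (hc : c < heap.length) → (c = 2 * pos + 1 ∨ c = 2 * pos + 2) → hle item heap[c]),
    ParentInv (siftdownA heap 0 pos item) ∧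
    (siftdownA heap 0 pos item).Perm (heap.set pos item) := by
  induction pos using Nat.strong_induction_on with
  | _ pos ih =>
    intro heap item hpos HA HB HC
    rw [siftdownA_eq]
    by_cases h0 : 0 < pos
    · have hpp : (pos - 1) / 2 < heap.length := by omega
      have hbang : heap[(pos - 1) / 2]! = heap[(pos - 1) / 2]'hpp := getElem!_pos heap _ hpp
      rw [if_pos h0, hbang]
      by_cases hlt : pairLt item (heap[(pos - 1) / 2]'hpp)
      · rw [if_pos hlt]
        have hpplt : (pos - 1) / 2 < pos := by omega
        obtain ⟨h1, h2⟩ := ih ((pos - 1) / 2) hpplt (heap.set pos (heap[(pos - 1) / 2]'hpp)) item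
          (by rw [List.length_set]; omega)
          (by -- heap condition away from the new hole
            intro j hj hj0 hjp hpj
            rw [List.length_set] at hj
            rw [List.getElem_set, List.getElem_set]
            split_ifs with hA hB hB
            · omega
            · -- (j-1)/2 = pos, j ≠ pos : j is a child of pos
              exact HB j hj (by omega) h0
            · -- j = pos : then (j-1)/2 = (pos-1)/2, excluded by hpj
              omega
            · exact HA j hj hj0 (by omega) (by omega))
          (by -- grandparent dominates the children of the new hole
            intro c hc hcc hp0
            rw [List.length_set] at hc
            rw [List.getElem_set, List.getElem_set]
            split_ifs with hA hB hB
            · omega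
            · omega
            · -- c = pos : the moved-down parent sits there
              exact HA ((pos - 1) / 2) hpp hp0 (by omega) (by omega)
            · -- c ≠ pos : a sibling of pos under (pos-1)/2
              have hidx : (c - 1) / 2 = (pos - 1) / 2 := by omega
              refine hle_trans (HA ((pos - 1) / 2) hpp hp0 (by omega) (by omega)) ?_
              have := HA c hc (by omega) (by omega) (by omega)
              simpa only [hidx] using this)
          (by -- item is below the children of the new hole
            intro c hc hcc
            rw [List.length_set] at hc
            rw [List.getElem_set]
            split_ifs with hA
            · exact pairLt_asymm hlt
            · have hidx : (c - 1) / 2 = (pos - 1) / 2 := by omega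
              refine hle_trans (pairLt_asymm hlt) ?_
              have := HA c hc (by omega) (by omega) (by omega)
              simpa only [hidx] using this)
        refine ⟨h1, h2.trans ?_⟩
        have hswap := perm_set_swap heap pos ((pos - 1) / 2) (heap[(pos - 1) / 2]'hpp) item
          hpos hpp (by omega)
        refine hswap.trans ?_
        have hval : (heap.set pos item)[(pos - 1) / 2]'(by rw [List.length_set]; omega) =
            heap[(pos - 1) / 2]'hpp := by
          rw [List.getElem_set, if_neg (by omega)]
        rw [← hval, List.set_getElem_self]
      · rw [if_neg hlt]
        refine ⟨?_, List.Perm.refl _⟩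
        intro j hj hj0
        rw [List.length_set] at hj
        rw [List.getElem_set, List.getElem_set]
        split_ifs with hA hB hB
        · omega
        · exact HC j hj (by omega)
        · -- j = pos : the branch test failed, so heap[(pos-1)/2] ≤ item
          have hidx : (j - 1) / 2 = (pos - 1) / 2 := by omega
          simp only [hidx]
          exact hle_of_not_lt (by simpa using hlt)
        · exact HA j hj hj0 (by omega) (by omega)
    · have hp0 : pos = 0 := by omega
      subst hp0
      rw [if_neg (by omega)]
      refine ⟨?_, List.Perm.refl _⟩
      intro j hj hj0
      rw [List.length_set] at hj
      rw [List.getElem_set, List.getElem_set]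
      split_ifs with hA hB hB
      · omega
      · exact HC j hj (by omega)
      · omega
      · exact HA j hj hj0 (by omega) (by omega)

-- ===== siftup (sink then bubble-up) correctness =====
lemma siftupAGo_congr (fuel : Nat) :
    ∀ (fuel' : Nat) (heap : List (Int × String)) (sp pos : Nat) (item : Int × String),
    heap.length - pos < fuel → heap.length - pos < fuel' →
    siftupAGo fuel heap sp pos item = siftupAGo fuel' heap sp pos item := by
  induction fuel with
  | zero => intro fuel' heap sp pos item h _; omega
  | succ n ih =>
    intro fuel' heap sp pos item h h'
    cases fuel' with
    | zero => omega
    | succ n' =>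
      rw [siftupAGo, siftupAGo]
      simp only
      split
      · next hch =>
        refine ih n' _ sp _ item ?_ ?_ <;>
          · rw [List.length_set]
            split <;> omega
      · rfl

lemma siftupA_eq (heap : List (Int × String)) (sp pos : Nat) (item : Int × String) :
    siftupA heap sp pos item =
      if 2 * pos + 1 < heap.length then
        (let cp := if 2 * pos + 1 + 1 < heap.length &&
                      !pairLt heap[2 * pos + 1]! heap[2 * pos + 1 + 1]! then 2 * pos + 1 + 1
                   else 2 * pos + 1
         siftupA (heap.set pos heap[cp]!) sp cp item)
      else siftdownA (heap.set pos item) sp pos item := by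
  rw [siftupA, siftupAGo]
  by_cases h : 2 * pos + 1 < heap.length
  · simp only [if_pos h]
    rw [siftupA]
    refine siftupAGo_congr _ _ _ sp _ item ?_ ?_ <;>
      · rw [List.length_set]
        split <;> omega
  · simp only [if_neg h]

lemma siftupA_spec (n : Nat) :
    ∀ (pos : Nat) (heap : List (Int × String)) (item : Int × String)
    (hn : heap.length - pos ≤ n)
    (hpos : pos < heap.length)
    (HA : ∀ j, (hj : j < heap.length) → 0 < j → j ≠ pos → (j - 1) / 2 ≠ pos →
          hle (heap[(j - 1) / 2]'(by omega)) heap[j])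
    (HB : ∀ c, (hc : c < heap.length) → (c = 2 * pos + 1 ∨ c = 2 * pos + 2) → 0 < pos →
          hle (heap[(pos - 1) / 2]'(by omega)) heap[c]),
    ParentInv (siftupA heap 0 pos item) ∧
    (siftupA heap 0 pos item).Perm (heap.set pos item) := by
  induction n with
  | zero => intro pos heap item hn hpos _ _; omega
  | succ n ih =>
    intro pos heap item hn hpos HA HB
    rw [siftupA_eq]
    by_cases hch : 2 * pos + 1 < heap.length
    · rw [if_pos hch]
      have key : ∀ cp, (hcp1 : cp < heap.length) → pos < cp →
          (cp = 2 * pos + 1 ∨ cp = 2 * pos + 2) →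
          (∀ d, (hd : d < heap.length) → (d = 2 * pos + 1 ∨ d = 2 * pos + 2) →
            hle (heap[cp]'hcp1) heap[d]) →
          ParentInv (siftupA (heap.set pos heap[cp]!) 0 cp item) ∧
          (siftupA (heap.set pos heap[cp]!) 0 cp item).Perm (heap.set pos item) := by
        intro cp hcp1 hcp2 hcp3 hmin
        have hbang : heap[cp]! = heap[cp]'hcp1 := getElem!_pos heap _ hcp1
        rw [hbang]
        obtain ⟨h1, h2⟩ := ih cp (heap.set pos (heap[cp]'hcp1)) item
          (by rw [List.length_set]; omega)
          (by rw [List.length_set]; omega)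
          (by -- heap condition away from the new hole cp
            intro j hj hj0 hjc hpc
            rw [List.length_set] at hj
            rw [List.getElem_set, List.getElem_set]
            split_ifs with hA hB hB
            · omega
            · -- (j-1)/2 = pos, j ≠ pos : j is the sibling (or cp itself, excluded)
              exact hmin j hj (by omega)
            · -- j = pos : the chosen child moved up; parent of pos dominates children of pos
              have hidx : (j - 1) / 2 = (pos - 1) / 2 := by omega
              simp only [hidx]
              exact HB cp hcp1 hcp3 (by omega)
            · exact HA j hj hj0 (by omega) (by omega))
          (by -- grandparent (= pos) dominates the children of the new hole cp
            intro c hc hcc _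
            have hb : 2 * cp + 1 ≤ c ∧ c ≤ 2 * cp + 2 := by rcases hcc with h | h <;> omega
            rw [List.length_set] at hc
            have hidx : (cp - 1) / 2 = pos := by rcases hcp3 with h | h <;> omega
            simp only [hidx]
            rw [List.getElem_set, List.getElem_set, if_pos rfl, if_neg (by omega)]
            have hidx2 : (c - 1) / 2 = cp := by omega
            have := HA c hc (by omega) (by omega) (by
              rcases hcp3 with h | h <;> omega)
            simpa only [hidx2] using this)
        refine ⟨h1, h2.trans ?_⟩
        have hswap := perm_set_swap heap pos cp (heap[cp]'hcp1) item hpos hcp1 (by omega)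
        refine hswap.trans ?_
        have hval : (heap.set pos item)[cp]'(by rw [List.length_set]; omega) =
            heap[cp]'hcp1 := by
          rw [List.getElem_set, if_neg (by omega)]
        rw [← hval, List.set_getElem_self]
      by_cases hr : (2 * pos + 1 + 1 < heap.length &&
          !pairLt heap[2 * pos + 1]! heap[2 * pos + 1 + 1]!) = true
      · simp only [hr, if_true]
        have hr' := hr
        simp only [Bool.and_eq_true, Bool.not_eq_true', decide_eq_true_eq] at hr'
        obtain ⟨hrl, hplt⟩ := hr'
        refine key (2 * pos + 1 + 1) hrl (by omega) (by omega) ?_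
        intro d hd hdd
        rw [getElem!_pos heap _ (by omega : 2 * pos + 1 < heap.length),
            getElem!_pos heap _ hrl] at hplt
        rcases hdd with h | h
        · subst h
          exact hle_of_not_lt hplt
        · have hd2 : d = 2 * pos + 1 + 1 := by omega
          subst hd2
          exact hle_refl _
      · simp only [hr]
        refine key (2 * pos + 1) hch (by omega) (by omega) ?_
        intro d hd hdd
        rcases hdd with h | h
        · subst h; exact hle_refl _
        · -- right child exists but the left one is strictly smaller
          have hd2 : d = 2 * pos + 1 + 1 := by omega
          subst hd2
          have hlt : pairLt heap[2 * pos + 1]! heap[2 * pos + 1 + 1]! = true := by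
            by_cases hq : pairLt heap[2 * pos + 1]! heap[2 * pos + 1 + 1]! = true
            · exact hq
            · exfalso
              apply hr
              simp only [Bool.and_eq_true, Bool.not_eq_true', decide_eq_true_eq]
              exact ⟨by omega, by simpa using hq⟩
          rw [getElem!_pos heap _ (by omega : 2 * pos + 1 < heap.length),
              getElem!_pos heap _ hd] at hlt
          exact pairLt_asymm hlt
    · rw [if_neg hch]
      obtain ⟨h1, h2⟩ := siftdownA_spec pos (heap.set pos item) item
        (by rw [List.length_set]; omega)
        (by
          intro j hj hj0 hjp hpj
          rw [List.length_set] at hj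
          rw [List.getElem_set, List.getElem_set]
          rw [if_neg (by omega), if_neg (by omega)]
          exact HA j hj hj0 (by omega) (by omega))
        (by intro c hc hcc _; rw [List.length_set] at hc; omega)
        (by intro c hc hcc; rw [List.length_set] at hc; omega)
      exact ⟨h1, h2.trans (by rw [List.set_set])⟩

-- ===== push / pop / drain =====
lemma heappushA_spec (heap : List (Int × String)) (item : Int × String) (hp : ParentInv heap) :
    ParentInv (heappushA heap item) ∧ (heappushA heap item).Perm (item :: heap) := by
  unfold heappushA
  have hlen : heap.length < (heap ++ [item]).length := by simp
  obtain ⟨h1, h2⟩ := siftdownA_spec heap.length (heap ++ [item]) item hlen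
    (by
      intro j hj hj0 hjp hpp
      have hjlt : j < heap.length := by simp at hj; omega
      have hplt : (j - 1) / 2 < heap.length := by omega
      rw [List.getElem_append_left hjlt, List.getElem_append_left hplt]
      exact hp j hjlt hj0)
    (by intro c hc hcc _; simp at hc; omega)
    (by intro c hc hcc; simp at hc; omega)
  refine ⟨h1, h2.trans ?_⟩
  have hset : (heap ++ [item]).set heap.length item = heap ++ [item] := by
    have := List.set_getElem_self hlen
    rwa [List.getElem_concat_length rfl hlen] at this
  rw [hset]
  exact List.perm_append_singleton item heap

lemma heappopA_spec (heap : List (Int × String)) (hne : heap ≠ []) (hp : ParentInv heap) :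
    ParentInv (heappopA heap).2 ∧
    ((heappopA heap).1 :: (heappopA heap).2).Perm heap ∧
    (∀ y ∈ heap, hle (heappopA heap).1 y) := by
  have hlen0 : 0 < heap.length := List.length_pos_iff.mpr hne
  have hlast : heap.getLast! = heap[heap.length - 1]'(by omega) := by
    rw [List.getLast!_eq_getElem!, getElem!_pos heap _ (by omega)]
  have hmin : ∀ y ∈ heap, hle (heap[0]'hlen0) y := by
    intro y hy
    obtain ⟨i, hi, rfl⟩ := List.mem_iff_getElem.mp hy
    exact parentInv_min hp i hi
  have hsplit : heap.dropLast ++ [heap[heap.length - 1]'(by omega)] = heap := by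
    rw [← List.getLast_eq_getElem hne]
    exact List.dropLast_concat_getLast hne
  unfold heappopA
  by_cases hr : heap.dropLast.length ≠ 0
  · rw [if_pos hr]
    have hrl : 0 < heap.dropLast.length := by omega
    have hld : heap.dropLast.length = heap.length - 1 := List.length_dropLast
    have hrest0 : heap.dropLast[0]! = heap[0]'hlen0 := by
      rw [getElem!_pos heap.dropLast _ hrl, List.getElem_dropLast]
    have hpr : ∀ j, (hj : j < heap.dropLast.length) → ∀ (hj' : j < heap.length),
        heap.dropLast[j]'hj = heap[j]'hj' := by
      intro j hj hj'
      exact List.getElem_dropLast hj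
    obtain ⟨h1, h2⟩ := siftupA_spec (heap.dropLast.length) 0
      (heap.dropLast.set 0 heap.getLast!) heap.getLast!
      (by rw [List.length_set]; omega)
      (by rw [List.length_set]; omega)
      (by
        intro j hj hj0 hjp hpj
        rw [List.length_set] at hj
        rw [List.getElem_set, List.getElem_set]
        split_ifs with hA hB hB
        · omega
        · omega
        · omega
        · rw [hpr j hj (by omega), hpr ((j - 1) / 2) (by omega) (by omega)]
          exact hp j (by omega) hj0)
      (by intro c hc hcc h0; exact absurd h0 (lt_irrefl 0))
    simp only
    refine ⟨h1, ?_, ?_⟩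
    · -- permutation with the original heap
      have h3 : (siftupA (heap.dropLast.set 0 heap.getLast!) 0 0 heap.getLast!).Perm
          (heap.dropLast.set 0 heap.getLast!) := by
        have := h2
        rwa [List.set_set] at this
      rw [List.perm_iff_count]
      intro v
      have hcnt := h3.count_eq v
      have hcset := count_set heap.dropLast 0 heap.getLast! v hrl
      conv_rhs => rw [← hsplit]
      rw [List.count_cons, List.count_append, hrest0]
      simp only [List.count_cons, List.count_nil, beq_iff_eq] at *
      rw [hpr 0 hrl (by omega)] at hcset
      rw [← hlast]
      split_ifs at * <;> omega
    · intro y hy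
      rw [hrest0]
      exact hmin y hy
  · rw [if_neg hr]
    have hlen1 : heap.length = 1 := by
      have := List.length_dropLast (xs := heap)
      omega
    have hdrop : heap.dropLast = [] := List.length_eq_zero_iff.mp (by omega)
    have hheap : heap = [heap[heap.length - 1]'(by omega)] := by
      conv_lhs => rw [← hsplit, hdrop]
      rfl
    simp only
    refine ⟨?_, ?_, ?_⟩
    · intro j hj hj0
      rw [hdrop] at hj
      simp at hj
    · rw [hdrop, hlast]
      conv_rhs => rw [hheap]
    · intro y hy
      rw [hheap] at hy
      rcases List.mem_singleton.mp hy with rfl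
      rw [hlast]
      exact hle_refl _

lemma foldl_heappushA_spec (ps : List (Int × String)) (h : List (Int × String))
    (hp : ParentInv h) :
    ParentInv (ps.foldl heappushA h) ∧ (ps.foldl heappushA h).Perm (h ++ ps) := by
  induction ps generalizing h with
  | nil => simpa using hp
  | cons x t ih =>
    obtain ⟨hp1, hperm1⟩ := heappushA_spec h x hp
    obtain ⟨hp2, hperm2⟩ := ih (heappushA h x) hp1
    refine ⟨hp2, hperm2.trans ((hperm1.append_right t).trans ?_)⟩
    exact List.perm_middle.symm

lemma drainAGo_congr (fuel : Nat) :
    ∀ (fuel' : Nat) (heap : List (Int × String)) (res : List String),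
    heap.length ≤ fuel → heap.length ≤ fuel' →
    drainAGo fuel heap res = drainAGo fuel' heap res := by
  induction fuel with
  | zero =>
    intro fuel' heap res h _
    have : heap.length = 0 := by omega
    cases fuel' <;> simp [drainAGo, this]
  | succ n ih =>
    intro fuel' heap res h h'
    cases fuel' with
    | zero =>
      have : heap.length = 0 := by omega
      simp [drainAGo, this]
    | succ n' =>
      rw [drainAGo, drainAGo]
      simp only
      split
      · next hne =>
        have hlen := length_heappopA heap hne
        exact ih n' _ _ (by omega) (by omega)
      · rfl

lemma drainA_eq (heap : List (Int × String)) (res : List String) :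
    drainA heap res = if heap.length ≠ 0 then
      drainA (heappopA heap).2 (res ++ [(heappopA heap).1.2]) else res := by
  by_cases h : heap.length ≠ 0
  · rw [if_pos h]
    have hlen := length_heappopA heap h
    have hl : heap.length = (heap.length - 1) + 1 := by omega
    rw [drainA, drainA, hl, drainAGo]
    simp only
    rw [if_pos h]
    exact drainAGo_congr _ _ _ _ (by omega) (by omega)
  · rw [if_neg h]
    have h0 : heap.length = 0 := by omega
    rw [drainA, h0]
    simp [drainAGo]

lemma drainA_spec (n : Nat) (heap : List (Int × String)) (acc : List String)
    (hn : heap.length ≤ n) (hp : ParentInv heap) :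
    ∃ ps : List (Int × String), ps.Perm heap ∧ ps.Pairwise hle ∧
      drainA heap acc = acc ++ ps.map Prod.snd := by
  induction n generalizing heap acc with
  | zero =>
    have : heap = [] := List.length_eq_zero_iff.mp (by omega)
    subst this
    exact ⟨[], by simp [drainA, drainAGo]⟩
  | succ n ih =>
    by_cases hne : heap.length = 0
    · have : heap = [] := List.length_eq_zero_iff.mp hne
      subst this
      exact ⟨[], by simp [drainA, drainAGo]⟩
    · obtain ⟨hp1, hperm1, hmin1⟩ := heappopA_spec heap (by simpa using List.length_pos_iff.mp (by omega)) hp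
      have hlen : (heappopA heap).2.length = heap.length - 1 := length_heappopA heap hne
      obtain ⟨ps, hperm, hpw, heq⟩ := ih (heappopA heap).2 (acc ++ [(heappopA heap).1.2]) (by omega) hp1
      refine ⟨(heappopA heap).1 :: ps, (hperm.cons _).trans hperm1, ?_, ?_⟩
      · refine List.pairwise_cons.mpr ⟨?_, hpw⟩
        intro y hy
        exact hmin1 y ((hperm1.subset (List.mem_cons_of_mem _ (hperm.subset hy))))
      · rw [drainA_eq, if_pos hne]
        rw [heq]; simp

-- ===== B side: sorted2 as insertion sort on the (key, word) pairs =====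
def bpair (w : String) : Int × String := (bkey w, w)

lemma vowelCountA_eq (w : String) : vowelCountA w = vowelCountB w := by
  simp [vowelCountA, vowelCountB, List.countP_eq_length_filter, List.map_const',
    List.sum_replicate]

lemma apair_eq_bpair (w : String) : apair w = bpair w := by
  have h := vowelCountA_eq w
  simp only [apair, bpair, bkey, h]
  have : vowelCountB w - ((PySem.Str.len w : Int) - vowelCountB w)
      = 2 * vowelCountB w - (PySem.Str.len w : Int) := by ring
  rw [this]

def bBefore (k1 : String → Int) (a b : String) : Bool :=
  decide (k1 a < k1 b) || (!decide (k1 b < k1 a) && decide (a < b))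

lemma map_insertBy (x : String) (ys : List String) :
    (PySem.List.insertBy (bBefore bkey) x ys).map bpair =
      PySem.List.insertBy pairLt (bpair x) (ys.map bpair) := by
  induction ys with
  | nil => simp [PySem.List.insertBy]
  | cons y t ih =>
    have hb : bBefore bkey x y = pairLt (bpair x) (bpair y) := rfl
    simp only [PySem.List.insertBy, List.map_cons, hb]
    split <;> simp_all

lemma foldl_insertBy_map (ws : List String) (acc : List String) :
    (ws.foldl (fun acc x => PySem.List.insertBy (bBefore bkey) x acc) acc).map bpair =
      (ws.map bpair).foldl (fun acc x => PySem.List.insertBy pairLt x acc) (acc.map bpair) := by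
  induction ws generalizing acc with
  | nil => simp
  | cons w t ih => simp only [List.foldl_cons, List.map_cons, ih, map_insertBy]

lemma sorted2_map_bpair (ws : List String) :
    (PySem.List.sorted2 ws (fun w => bkey w) (fun w => w) false).map bpair =
      (ws.map bpair).foldl (fun acc x => PySem.List.insertBy pairLt x acc) [] := by
  have h : PySem.List.sorted2 ws (fun w => bkey w) (fun w => w) false =
      ws.foldl (fun acc x => PySem.List.insertBy (bBefore bkey) x acc) [] := rfl
  rw [h, foldl_insertBy_map]
  rfl

lemma insertBy_pairwise {x : Int × String} {ys : List (Int × String)}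
    (h : ys.Pairwise hle) : (PySem.List.insertBy pairLt x ys).Pairwise hle := by
  induction ys with
  | nil => simp [PySem.List.insertBy]
  | cons y t ih =>
    obtain ⟨hy, ht⟩ := List.pairwise_cons.mp h
    simp only [PySem.List.insertBy]
    split
    · next hlt =>
      refine List.pairwise_cons.mpr ⟨?_, h⟩
      intro z hz
      rcases List.mem_cons.mp hz with rfl | hz
      · exact hle_of_lt hlt
      · exact hle_trans (hle_of_lt hlt) (hy z hz)
    · next hlt =>
      refine List.pairwise_cons.mpr ⟨?_, ih ht⟩
      intro z hz
      rcases (PySem.List.mem_insertBy pairLt x z t).mp hz with rfl | hz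
      · exact hle_of_not_lt (by simpa using hlt)
      · exact hy z hz

lemma foldl_insertBy_pairwise (ps : List (Int × String)) (acc : List (Int × String))
    (h : acc.Pairwise hle) :
    (ps.foldl (fun acc x => PySem.List.insertBy pairLt x acc) acc).Pairwise hle := by
  induction ps generalizing acc with
  | nil => exact h
  | cons x t ih => exact ih _ (insertBy_pairwise h)

-- ===== VERDICT (by name: the statement is the Claim_ definition above) =====
theorem sortByDiff_spec : Claim_equal_sortByDiff := by
  intro text _
  unfold Spec_sortByDiff sortByDiff sortByDiff_alt
  simp only
  -- A side: the heap the fold builds is a permutation of the pairs, with the heap invariant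
  have hfoldeq : (PySem.Str.split₀ text).foldl (fun h word => heappushA h (apair word)) [] =
      ((PySem.Str.split₀ text).map apair).foldl heappushA [] := by
    rw [List.foldl_map]
  obtain ⟨hpH, hpermH⟩ := foldl_heappushA_spec ((PySem.Str.split₀ text).map apair) []
    (by intro j hj _; simp at hj)
  obtain ⟨ps, hpsperm, hpspw, hdrain⟩ :=
    drainA_spec (((PySem.Str.split₀ text).map apair).foldl heappushA []).length
      (((PySem.Str.split₀ text).map apair).foldl heappushA []) [] le_rfl hpH
  -- B side: sorted2 mapped to pairs is an insertion sort of the same pairs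
  have hmapab : (PySem.Str.split₀ text).map apair = (PySem.Str.split₀ text).map bpair :=
    List.map_congr_left (fun w _ => apair_eq_bpair w)
  have hzpw : ((PySem.List.sorted2 (PySem.Str.split₀ text) (fun w => bkey w) (fun w => w)
      false).map bpair).Pairwise hle := by
    rw [sorted2_map_bpair]
    exact foldl_insertBy_pairwise _ _ List.Pairwise.nil
  have hzperm : ((PySem.List.sorted2 (PySem.Str.split₀ text) (fun w => bkey w) (fun w => w)
      false).map bpair).Perm ((PySem.Str.split₀ text).map bpair) :=
    (PySem.List.sorted2_perm (PySem.Str.split₀ text) (fun w => bkey w) (fun w => w) false).map bpair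
  -- the two sorted pair lists are permutations of each other, both pairwise-≤, hence equal
  have hps_eq : ps = (PySem.List.sorted2 (PySem.Str.split₀ text) (fun w => bkey w) (fun w => w)
      false).map bpair := by
    refine List.Perm.eq_of_pairwise (le := hle)
      (fun a b _ _ hab hba => hle_antisymm hab hba) hpspw hzpw ?_
    refine (hpsperm.trans (hpermH.trans ?_)).trans hzperm.symm
    simp [hmapab]
  rw [hfoldeq, hdrain, hps_eq]
  rw [List.map_map]
  simp only [List.nil_append]
  have : (Prod.snd ∘ bpair) = id := funext (fun w => rfl)
  rw [this, List.map_id]
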